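-- pv_equiv track=rewrite | github.com/som1sezhi/itg-difficulty-predictor | analysis/hash.py | _minimize_measure
-- ===== SOURCE A (Python) =====
-- def _minimize_measure(measure):
--     if not measure:
--         # if the measure is empty, it will cause an infinite loop in
--         # the while loop after this, so we have to catch it now
--         # TODO: figure out a more proper way of dealing with empty measures
--         raise RuntimeError('chart contains an empty measure')
--     minimal = False
--     while not minimal and len(measure) % 2 == 0:
--         all_zeroes = True
--         for row in measure[1::2]:
--             if row != '0' * len(row):
--                 all_zeroes = False
--                 break
--         if all_zeroes:
--             measure = measure[::2]
--         else:
--             minimal = True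
--     return measure
-- ===== SOURCE B (Python) =====
-- def _v2(x):
--     # largest e with 2**e dividing x (x > 0)
--     v = 0
--     while x % 2 == 0:
--         x //= 2
--         v += 1
--     return v
--
-- def _minimize_measure(measure):
--     if not measure:
--         raise RuntimeError('chart contains an empty measure')
--     n = len(measure)
--     k = _v2(n)
--     for i, row in enumerate(measure):
--         if i and row != '0' * len(row):
--             v = _v2(i)
--             if v < k:
--                 k = v
--     return measure if k == 0 else measure[::2 ** k]
-- ===== Notes on version B (the rewrite author's own statement) =====
-- stated objective: alternative
-- what changed: Replaced A's repeated halve-and-rescan while loop with a single pass that computes the minimum 2-adic valuation over nonzero rows (capped by the valuation of the length) and takes one strided slice measure[::2**k].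
import Mathlib
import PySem

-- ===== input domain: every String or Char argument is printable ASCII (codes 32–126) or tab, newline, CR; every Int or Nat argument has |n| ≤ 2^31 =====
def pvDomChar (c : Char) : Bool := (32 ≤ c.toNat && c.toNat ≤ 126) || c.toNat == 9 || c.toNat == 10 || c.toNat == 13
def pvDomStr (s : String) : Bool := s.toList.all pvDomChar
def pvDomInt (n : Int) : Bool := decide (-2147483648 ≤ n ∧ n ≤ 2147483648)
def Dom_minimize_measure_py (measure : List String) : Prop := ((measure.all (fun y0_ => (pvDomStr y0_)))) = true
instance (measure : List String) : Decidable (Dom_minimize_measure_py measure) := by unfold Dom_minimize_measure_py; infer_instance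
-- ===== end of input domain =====

-- B replaces A's repeated halving passes by a single pass computing the minimum 2-adic valuation, then one strided slice (objective: alternative).

-- ===== PORT A =====
-- row != '0' * len(row)  (the zero-row test, textually identical in both Pythons)
def zeroRow (row : String) : Bool := row == String.ofList (List.replicate row.toList.length '0')

-- termination helper for port A's while loop: measure[::2] is strictly shorter
theorem slice2_len_lt (m : List String) (hm : m ≠ []) (he : m.length % 2 = 0) :
    ((PySem.List.slice? m none none 2).getD []).length < m.length := by
  have hn : 2 ≤ m.length := by
    rcases Nat.eq_zero_or_pos m.length with h | h
    · exact absurd (List.length_eq_zero_iff.mp h) hm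
    · omega
  simp only [PySem.List.slice?, PySem.List.sliceIndices,
    if_neg (show ¬((2:Int) = 0) by omega), if_neg (show ¬((2:Int) < 0) by omega),
    if_pos (show (0:Int) < 2 by omega)]
  rw [if_pos (show (0:Int) < (m.length:Int) by exact_mod_cast hn.trans_lt' (by omega))]
  rw [Option.getD_some]
  calc (List.filterMap (fun k : Nat => m[(((0:Int) + 2 * (k:Int))).toNat]?)
          (List.range ((((m.length:Int) - 0 + 2 - 1)) / 2).toNat)).length
      ≤ (List.range ((((m.length:Int) - 0 + 2 - 1)) / 2).toNat).length :=
        List.length_filterMap_le _ _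
    _ = (((m.length:Int) - 0 + 2 - 1) / 2).toNat := List.length_range
    _ < m.length := by
        rw [show ((m.length:Int) - 0 + 2 - 1) = (((m.length + 1 : Nat)) : Int) by omega,
            show (2:Int) = ((2:Nat):Int) from rfl, ← Int.natCast_div, Int.toNat_natCast]
        omega

def minimize_measure_py_loop (measure : List String) : List String :=
  if h : measure.length % 2 = 0 ∧ measure ≠ [] then
    let odd := (PySem.List.slice? measure (some 1) none 2).getD []
    if odd.all zeroRow then
      minimize_measure_py_loop ((PySem.List.slice? measure none none 2).getD [])
    else measure
  else measure
termination_by measure.length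
decreasing_by exact slice2_len_lt measure h.2 h.1

def minimize_measure_py (measure : List String) : List String :=
  if measure = [] then []   -- Python raises RuntimeError here (excluded by Pre_)
  else minimize_measure_py_loop measure

-- ===== PORT B =====
-- _v2: strip factors of two by halving (all uses have x > 0; the x ≠ 0 guard only makes the port total)
def pyV2 (x : Nat) : Nat :=
  if h : x % 2 = 0 ∧ x ≠ 0 then pyV2 (x / 2) + 1 else 0
termination_by x
decreasing_by exact Nat.div_lt_self (Nat.pos_of_ne_zero h.2) (by omega)

def minimize_measure_py_alt (measure : List String) : List String :=
  if measure = [] then []   -- Python raises RuntimeError here (excluded by Pre_)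
  else
    let n := measure.length
    let k := (PySem.List.enumerate measure 0).foldl
      (fun k p => if p.1 ≠ 0 ∧ ¬ zeroRow p.2 then min k (pyV2 p.1.toNat) else k)
      (pyV2 n)
    if k = 0 then measure
    else (PySem.List.slice? measure none none ((2:Int) ^ k)).getD []

-- ===== PRECONDITION & SPEC =====
-- Pre_ excludes only the empty list, on which both Pythons raise RuntimeError.
def Pre_minimize_measure_py (measure : List String) : Prop := measure ≠ []
instance (measure : List String) : Decidable (Pre_minimize_measure_py measure) := by
  unfold Pre_minimize_measure_py; infer_instance
def pvWitness_minimize_measure_py : List String := ["0010", "0000", "1000", "0000"]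

def Spec_minimize_measure_py (measure : List String) (out : List String) : Prop :=
  out = minimize_measure_py_alt measure
instance (measure : List String) (out : List String) : Decidable (Spec_minimize_measure_py measure out) := by
  unfold Spec_minimize_measure_py; infer_instance

-- ===== CLAIM (what is proved, stated in full; the proofs are below) =====
def Claim_equal_minimize_measure_py : Prop := ∀ (measure : List String), Dom_minimize_measure_py measure → Pre_minimize_measure_py measure → Spec_minimize_measure_py measure (minimize_measure_py measure)

-- ===== LEMMAS AND PROOFS =====

def sliceStep (s : Nat) : List String → List String
  | [] => []
  | x :: t => x :: sliceStep s (t.drop (s - 1))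
termination_by xs => xs.length
decreasing_by simp

theorem sliceStep_ind (s : Nat) {P : List String → Prop} (h0 : P [])
    (h1 : ∀ x t, P (t.drop (s - 1)) → P (x :: t)) : ∀ m, P m := by
  intro m
  induction hn : m.length using Nat.strong_induction_on generalizing m with
  | _ n ih =>
  subst hn
  cases m with
  | nil => exact h0
  | cons x t =>
    exact h1 x t (ih _ (by simp only [List.length_drop, List.length_cons]; omega) _ rfl)

theorem sliceStep_nil (s : Nat) : sliceStep s [] = [] := by rw [sliceStep]

theorem sliceStep_cons (s : Nat) (x : String) (t : List String) :
    sliceStep s (x :: t) = x :: sliceStep s (t.drop (s - 1)) := by rw [sliceStep]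

theorem sliceStep_one (m : List String) : sliceStep 1 m = m := by
  induction m using sliceStep_ind 1 with
  | h0 => exact sliceStep_nil 1
  | h1 x t ih => simpa [sliceStep_cons] using ih

theorem getElem?_sliceStep (s : Nat) (hs : 0 < s) (m : List String) :
    ∀ j, (sliceStep s m)[j]? = m[s * j]? := by
  induction m using sliceStep_ind s with
  | h0 => intro j; simp [sliceStep_nil]
  | h1 x t ih =>
    intro j
    cases j with
    | zero => simp [sliceStep_cons]
    | succ j =>
      rw [sliceStep_cons, List.getElem?_cons_succ, ih, List.getElem?_drop]
      have h1 : s * (j + 1) = (s - 1 + s * j) + 1 := by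
        cases s with
        | zero => omega
        | succ s' => ring_nf; omega
      rw [h1, List.getElem?_cons_succ]

theorem length_sliceStep_two (m : List String) : (sliceStep 2 m).length = (m.length + 1) / 2 := by
  induction m using sliceStep_ind 2 with
  | h0 => simp [sliceStep_nil]
  | h1 x t ih => simp only [sliceStep_cons, List.length_cons, ih, List.length_drop]; omega

theorem drop_sliceStep_two (j : Nat) (u : List String) :
    (sliceStep 2 u).drop j = sliceStep 2 (u.drop (2 * j)) := by
  induction j generalizing u with
  | zero => simp
  | succ j ih =>
    cases u with
    | nil => simp [sliceStep_nil]
    | cons x t =>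
      rw [sliceStep_cons, show (2 * (j+1)) = (2 * j + 1) + 1 by ring, List.drop_succ_cons, ih]
      rw [List.drop_succ_cons]
      rw [List.drop_drop]
      congr 2
      omega

theorem sliceStep_comp (s : Nat) (hs : 0 < s) (m : List String) :
    sliceStep s (sliceStep 2 m) = sliceStep (2 * s) m := by
  induction m using sliceStep_ind (2 * s) with
  | h0 => simp [sliceStep_nil]
  | h1 x t ih =>
    rw [sliceStep_cons 2, sliceStep_cons s, sliceStep_cons (2*s)]
    congr 1
    rw [drop_sliceStep_two, List.drop_drop,
        show (2 - 1 + 2 * (s - 1)) = 2 * s - 1 by omega, ih]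

theorem filterMap_range_eq_sliceStep (s : Nat) (hs : 0 < s) (m : List String) :
    (List.range ((m.length + s - 1) / s)).filterMap (fun k : Nat => m[s * k]?) = sliceStep s m := by
  induction m using sliceStep_ind s with
  | h0 =>
    rw [sliceStep_nil, List.length_nil,
        show (0 + s - 1) / s = 0 from Nat.div_eq_of_lt (by omega),
        List.range_zero, List.filterMap_nil]
  | h1 x t ih =>
    have hlen : ((x :: t).length + s - 1) / s = ((t.drop (s - 1)).length + s - 1) / s + 1 := by
      simp only [List.length_cons, List.length_drop]
      rcases Nat.lt_or_ge t.length s with h | h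
      · have h1 : (t.length + 1 + s - 1) / s = 1 :=
          Nat.div_eq_of_lt_le (by omega) (by omega)
        have h2 : (t.length - (s - 1) + s - 1) / s = 0 := Nat.div_eq_of_lt (by omega)
        omega
      · have h1 : t.length + 1 + s - 1 = (t.length - (s - 1) + s - 1) + s := by omega
        rw [h1, Nat.add_div_right _ hs]
    rw [hlen, List.range_succ_eq_map, List.filterMap_cons, List.filterMap_map]
    simp only [Nat.mul_zero, List.getElem?_cons_zero]
    rw [sliceStep_cons]
    congr 1
    rw [← ih]
    apply List.filterMap_congr
    intro k _
    show (x :: t)[s * (k + 1)]? = (t.drop (s - 1))[s * k]?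
    rw [List.getElem?_drop]
    have h1 : s * (k + 1) = (s - 1 + s * k) + 1 := by
      cases s with
      | zero => omega
      | succ s' => ring_nf; omega
    rw [h1, List.getElem?_cons_succ]

theorem slice?_pos_eq (s : Nat) (hs : 0 < s) (m : List String) :
    PySem.List.slice? m none none (s : Int) = some (sliceStep s m) := by
  simp only [PySem.List.slice?, PySem.List.sliceIndices]
  simp only [if_neg (by omega : ¬ (s : Int) = 0), if_neg (by omega : ¬ (s : Int) < 0),
    if_pos (by omega : (0:Int) < (s:Int))]
  congr 1
  rcases Nat.eq_zero_or_pos m.length with h0 | h0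
  · rw [if_neg (show ¬ ((0:Int) < (m.length:Int)) by omega)]
    have : m = [] := List.length_eq_zero_iff.mp h0
    subst this
    simp [sliceStep_nil]
  · rw [if_pos (show ((0:Int) < (m.length:Int)) by omega)]
    have hc : ((m.length - 0 + s - 1 : Int) / s).toNat = (m.length + s - 1) / s := by
      rw [show ((m.length : Int) - 0 + s - 1) = (((m.length + s - 1 : Nat) : Int)) by omega]
      rw [← Int.natCast_div]
      exact Int.toNat_natCast _
    rw [hc, ← filterMap_range_eq_sliceStep s hs m]
    apply List.filterMap_congr
    intro k _
    congr 1
    omega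

theorem slice?_one_two_eq (m : List String) (hm : m ≠ []) :
    PySem.List.slice? m (some 1) none 2 = some (sliceStep 2 (m.drop 1)) := by
  have hn : 1 ≤ m.length := by
    rcases Nat.eq_zero_or_pos m.length with h | h
    · exact absurd (List.length_eq_zero_iff.mp h) hm
    · omega
  simp only [PySem.List.slice?, PySem.List.sliceIndices]
  simp only [if_neg (by omega : ¬ (2 : Int) = 0), if_neg (by omega : ¬ (2 : Int) < 0),
    if_neg (by omega : ¬ (1 : Int) < 0), if_pos (by omega : (0:Int) < (2:Int)),
    min_eq_left (by exact_mod_cast hn : (1:Int) ≤ (m.length:Int))]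
  congr 1
  rcases Nat.lt_or_ge 1 m.length with h1 | h1
  · rw [if_pos (show (1:Int) < (m.length:Int) by exact_mod_cast h1)]
    have hc : ((m.length - 1 + 2 - 1 : Int) / 2).toNat = ((m.drop 1).length + 2 - 1) / 2 := by
      rw [show ((m.length : Int) - 1 + 2 - 1) = (((m.length - 1 + 2 - 1 : Nat) : Int)) by omega,
          show (2:Int) = ((2:Nat):Int) from rfl, ← Int.natCast_div, Int.toNat_natCast, List.length_drop]
    rw [hc, ← filterMap_range_eq_sliceStep 2 (by omega) (m.drop 1)]
    apply List.filterMap_congr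
    intro k _
    rw [List.getElem?_drop]
    congr 1
  · -- m.length = 1: slice is empty, and so is sliceStep 2 (m.drop 1)
    rw [if_neg (show ¬ ((1:Int) < (m.length:Int)) by omega)]
    have : m.drop 1 = [] := List.drop_eq_nil_of_le (by omega)
    rw [this, sliceStep_nil, List.range_zero, List.filterMap_nil]

theorem getD_sliceStep (s : Nat) (hs : 0 < s) (m : List String) (j : Nat) :
    (sliceStep s m).getD j "" = m.getD (s * j) "" := by
  simp only [List.getD_eq_getElem?_getD, getElem?_sliceStep s hs]

theorem pyV2_odd (x : Nat) (h : x % 2 = 1) : pyV2 x = 0 := by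
  rw [pyV2]; simp [h]

theorem pyV2_double (x : Nat) (h : x ≠ 0) : pyV2 (2 * x) = pyV2 x + 1 := by
  rw [pyV2]
  have h1 : 2 * x % 2 = 0 := by omega
  have h2 : ¬ (2 * x = 0) := by omega
  have h3 : 2 * x / 2 = x := by omega
  simp [h1, h2, h3]

def kFold (m : List String) (c : Nat) : Nat :=
  (List.range m.length).foldl
    (fun k i => if i ≠ 0 ∧ ¬ zeroRow (m.getD i "") then min k (pyV2 i) else k) c

theorem foldl_min_le (f : Nat → Prop) [DecidablePred f] (g : Nat → Nat) :
    ∀ (l : List Nat) (c : Nat),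
      l.foldl (fun k i => if f i then min k (g i) else k) c ≤ c := by
  intro l
  induction l with
  | nil => intro c; simp
  | cons x t ih =>
    intro c
    simp only [List.foldl_cons]
    split_ifs with h
    · exact le_trans (ih _) (min_le_left _ _)
    · exact ih c

theorem kFold_le (m : List String) (c : Nat) : kFold m c ≤ c :=
  foldl_min_le _ _ _ _

theorem kFold_zero_of_hit (m : List String) (c : Nat) (i : Nat)
    (hi : i < m.length) (hne : i ≠ 0) (hz : ¬ zeroRow (m.getD i "") = true) (hv : pyV2 i = 0) :
    kFold m c = 0 := by
  have hmem : i ∈ List.range m.length := List.mem_range.mpr hi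
  obtain ⟨l1, l2, hsplit⟩ := List.append_of_mem hmem
  unfold kFold
  rw [hsplit, List.foldl_append, List.foldl_cons]
  rw [if_pos ⟨hne, hz⟩, hv]
  have hle := foldl_min_le (fun i => i ≠ 0 ∧ ¬ zeroRow (m.getD i "") = true) pyV2 l2
      (min (List.foldl (fun k i => if i ≠ 0 ∧ ¬ zeroRow (m.getD i "") = true then min k (pyV2 i) else k) c l1) 0)
  exact Nat.le_zero.mp (le_trans hle (min_le_right _ _))

def OddZero (m : List String) : Prop :=
  ∀ i, i < m.length → i % 2 = 1 → zeroRow (m.getD i "") = true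

theorem oddCheck_iff (m : List String) :
    (sliceStep 2 (m.drop 1)).all zeroRow = true ↔ OddZero m := by
  rw [List.all_eq_true]
  constructor
  · intro h i hi hodd
    have hget : (sliceStep 2 (m.drop 1))[(i - 1) / 2]? = some (m.getD i "") := by
      rw [getElem?_sliceStep 2 (by omega), List.getElem?_drop]
      rw [show 1 + 2 * ((i - 1) / 2) = i by omega]
      rw [List.getD_eq_getElem?_getD, List.getElem?_eq_getElem hi]
      rfl
    exact h _ (List.mem_of_getElem? hget)
  · intro h x hx
    obtain ⟨j, hj, hget⟩ := List.getElem_of_mem hx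
    have hsome : (sliceStep 2 (m.drop 1))[j]? = some x := by
      rw [List.getElem?_eq_getElem hj, hget]
    rw [getElem?_sliceStep 2 (by omega), List.getElem?_drop] at hsome
    have hlt : 1 + 2 * j < m.length := (List.getElem?_eq_some_iff.mp hsome).1
    have hval : m.getD (1 + 2 * j) "" = x := by
      rw [List.getD_eq_getElem?_getD, hsome]; rfl
    have := h (1 + 2 * j) hlt (by omega)
    rw [hval] at this
    exact this

theorem kFold_partial_double (m : List String) (h : Nat) (hlen : m.length = 2 * h)
    (hz : OddZero m) (c : Nat) :
    ∀ j, j ≤ h →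
      (List.range (2 * j)).foldl
          (fun k i => if i ≠ 0 ∧ ¬ zeroRow (m.getD i "") then min k (pyV2 i) else k) (c + 1)
        = (List.range j).foldl
            (fun k i => if i ≠ 0 ∧ ¬ zeroRow ((sliceStep 2 m).getD i "") then min k (pyV2 i) else k) c
          + 1 := by
  intro j
  induction j with
  | zero => intro _; simp
  | succ j ih =>
    intro hjh
    rw [show 2 * (j + 1) = (2 * j + 1) + 1 by ring, List.range_succ, List.foldl_append,
        List.range_succ, List.foldl_append]
    simp only [List.foldl_cons, List.foldl_nil]
    rw [List.range_succ, List.foldl_append]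
    simp only [List.foldl_cons, List.foldl_nil]
    rw [ih (by omega)]
    have hzodd : zeroRow (m.getD (2 * j + 1) "") = true :=
      hz (2 * j + 1) (by omega) (by omega)
    rw [if_neg (fun hcon => hcon.2 hzodd)]
    rcases Nat.eq_zero_or_pos j with hj0 | hjpos
    · subst hj0
      rw [if_neg (fun hcon => hcon.1 (by norm_num)), if_neg (fun hcon => hcon.1 (by norm_num))]
    · rw [getD_sliceStep 2 (by omega) m j]
      by_cases hc : zeroRow (m.getD (2 * j) "") = true
      · rw [if_neg (fun hcon => hcon.2 hc), if_neg (fun hcon => hcon.2 hc)]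
      · rw [if_pos ⟨by omega, hc⟩, if_pos ⟨by omega, hc⟩]
        rw [pyV2_double j (by omega)]
        omega

theorem kFold_double (m : List String) (h : Nat) (hlen : m.length = 2 * h)
    (hz : OddZero m) (c : Nat) :
    kFold m (c + 1) = kFold (sliceStep 2 m) c + 1 := by
  have hl2 : (sliceStep 2 m).length = h := by
    rw [length_sliceStep_two, hlen]; omega
  unfold kFold
  rw [hlen, hl2]
  exact kFold_partial_double m h hlen hz c h (le_refl h)

theorem loop_eq_sliceStep (m : List String) (hm : m ≠ []) :
    minimize_measure_py_loop m = sliceStep (2 ^ kFold m (pyV2 m.length)) m := by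
  induction hn : m.length using Nat.strong_induction_on generalizing m with
  | _ n ih =>
  subst hn
  have h0 : 0 < m.length := by
    rcases Nat.eq_zero_or_pos m.length with h | h
    · exact absurd (List.length_eq_zero_iff.mp h) hm
    · exact h
  by_cases hev : m.length % 2 = 0
  · rw [minimize_measure_py_loop, dif_pos ⟨hev, hm⟩]
    rw [slice?_one_two_eq m hm]
    simp only [Option.getD_some]
    by_cases hall : (sliceStep 2 (m.drop 1)).all zeroRow = true
    · rw [if_pos hall]
      have hz : OddZero m := (oddCheck_iff m).mp hall
      rw [show (2:Int) = ((2:Nat):Int) from rfl, slice?_pos_eq 2 (by omega) m, Option.getD_some]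
      have hh : m.length = 2 * (m.length / 2) := by omega
      have hl2 : (sliceStep 2 m).length = m.length / 2 := by
        rw [length_sliceStep_two]; omega
      have hm2ne : sliceStep 2 m ≠ [] := by
        intro hcon
        rw [hcon] at hl2
        simp only [List.length_nil] at hl2
        omega
      have hrec := ih (sliceStep 2 m).length (by omega) (sliceStep 2 m) hm2ne rfl
      rw [hrec, hl2]
      have hv : pyV2 m.length = pyV2 (m.length / 2) + 1 := by
        rw [hh]; rw [pyV2_double _ (by omega)]
        rw [← hh]
      rw [hv, kFold_double m (m.length / 2) hh hz (pyV2 (m.length / 2))]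
      rw [pow_succ, Nat.mul_comm (2 ^ _) 2]
      exact sliceStep_comp (2 ^ kFold (sliceStep 2 m) (pyV2 (m.length / 2))) (by positivity) m
    · rw [if_neg hall]
      have hex : ∃ i, i < m.length ∧ i % 2 = 1 ∧ ¬ zeroRow (m.getD i "") = true := by
        by_contra hcon
        refine hall ((oddCheck_iff m).mpr (fun i hi ho => ?_))
        by_contra hzi
        exact hcon ⟨i, hi, ho, hzi⟩
      obtain ⟨i, hi, hodd, hzi⟩ := hex
      have hk : kFold m (pyV2 m.length) = 0 :=
        kFold_zero_of_hit m _ i hi (by omega) hzi (pyV2_odd i hodd)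
      rw [hk, pow_zero, sliceStep_one]
  · rw [minimize_measure_py_loop, dif_neg (by tauto)]
    have hv : pyV2 m.length = 0 := pyV2_odd m.length (by omega)
    have hk : kFold m 0 = 0 := Nat.le_zero.mp (kFold_le m 0)
    rw [hv, hk, pow_zero, sliceStep_one]

theorem alt_fold_eq_kFold (m : List String) (c : Nat) :
    (PySem.List.enumerate m 0).foldl
        (fun k p => if p.1 ≠ 0 ∧ ¬ zeroRow p.2 then min k (pyV2 p.1.toNat) else k) c
      = kFold m c := by
  rw [PySem.List.enumerate_eq_map_pyRange m "", List.foldl_map,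
      show PySem.List.len m = ((m.length : Nat) : Int) from by simp [PySem.List.len],
      PySem.List.pyRange_zero_nat, List.foldl_map]
  unfold kFold
  apply PySem.List.foldl_congr_mem
  intro acc j _
  simp only [PySem.List.pyGetD_natCast, Int.toNat_natCast, ne_eq, Nat.cast_eq_zero]

theorem alt_eq_sliceStep (m : List String) (hm : m ≠ []) :
    minimize_measure_py_alt m = sliceStep (2 ^ kFold m (pyV2 m.length)) m := by
  rw [minimize_measure_py_alt, if_neg hm]
  simp only
  rw [alt_fold_eq_kFold m (pyV2 m.length)]
  by_cases hk : kFold m (pyV2 m.length) = 0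
  · rw [if_pos hk, hk, pow_zero, sliceStep_one]
  · rw [if_neg hk]
    rw [show ((2:Int) ^ kFold m (pyV2 m.length)) = (((2 ^ kFold m (pyV2 m.length) : Nat)) : Int) by push_cast; ring]
    rw [slice?_pos_eq _ (by positivity) m, Option.getD_some]

-- ===== VERDICT (by name: the statement is the Claim_ definition above) =====
theorem minimize_measure_py_spec : Claim_equal_minimize_measure_py := by
  intro measure _hdom hpre
  unfold Spec_minimize_measure_py
  rw [minimize_measure_py, if_neg hpre, loop_eq_sliceStep measure hpre,
      alt_eq_sliceStep measure hpre]
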